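-- pv_equiv track=rewrite | github.com/route250/carrier-war-vs | server/services/ai_llm_base.py | _nearest_sea
-- ===== SOURCE A (Python) =====
-- def _in_bounds(x: int, y: int, w: int, h: int) -> bool:
--     return 0 <= x < w and 0 <= y < h
--
-- def _is_sea(grid: list[list[int]], x: int, y: int) -> bool:
--     try:
--         return grid[y][x] == 0
--     except Exception:
--         return False
--
-- def _nearest_sea(grid: list[list[int]], x: int, y: int) -> tuple[int, int]:
--     """近傍の海セルに補正（見つからなければ元の座標）。"""
--     h = len(grid)
--     w = len(grid[0]) if h > 0 else 0
--     if _in_bounds(x, y, w, h) and _is_sea(grid, x, y):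
--         return x, y
--     for r in range(1, 7):
--         for dy in range(-r, r + 1):
--             for dx in range(-r, r + 1):
--                 nx, ny = x + dx, y + dy
--                 if _in_bounds(nx, ny, w, h) and _is_sea(grid, nx, ny):
--                     return nx, ny
--     return x, y
-- ===== SOURCE B (Python) =====
-- def _in_bounds(x: int, y: int, w: int, h: int) -> bool:
--     return 0 <= x < w and 0 <= y < h
--
-- def _is_sea(grid: list[list[int]], x: int, y: int) -> bool:
--     try:
--         return grid[y][x] == 0
--     except Exception:
--         return False
--
-- def _nearest_sea(grid: list[list[int]], x: int, y: int) -> tuple[int, int]: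
--     """Single pass over all offsets in the 13x13 square, picking the candidate
--     with the smallest (Chebyshev distance, dy, dx) key."""
--     h = len(grid)
--     w = len(grid[0]) if h > 0 else 0
--     if _in_bounds(x, y, w, h) and _is_sea(grid, x, y):
--         return x, y
--     best = None
--     for dy in range(-6, 7):
--         for dx in range(-6, 7):
--             nx, ny = x + dx, y + dy
--             if _in_bounds(nx, ny, w, h) and _is_sea(grid, nx, ny):
--                 key = (max(abs(dx), abs(dy)), dy, dx)
--                 if best is None or key < best[0]:
--                     best = (key, nx, ny)
--     return (best[1], best[2]) if best is not None else (x, y)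
-- ===== Notes on version B (the rewrite author's own statement) =====
-- stated objective: alternative
-- what changed: Replaces A's expanding-ring scan with nested early returns by a single pass over all 13x13 offsets that keeps the candidate with the smallest (Chebyshev distance, dy, dx) key.
import Mathlib
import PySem

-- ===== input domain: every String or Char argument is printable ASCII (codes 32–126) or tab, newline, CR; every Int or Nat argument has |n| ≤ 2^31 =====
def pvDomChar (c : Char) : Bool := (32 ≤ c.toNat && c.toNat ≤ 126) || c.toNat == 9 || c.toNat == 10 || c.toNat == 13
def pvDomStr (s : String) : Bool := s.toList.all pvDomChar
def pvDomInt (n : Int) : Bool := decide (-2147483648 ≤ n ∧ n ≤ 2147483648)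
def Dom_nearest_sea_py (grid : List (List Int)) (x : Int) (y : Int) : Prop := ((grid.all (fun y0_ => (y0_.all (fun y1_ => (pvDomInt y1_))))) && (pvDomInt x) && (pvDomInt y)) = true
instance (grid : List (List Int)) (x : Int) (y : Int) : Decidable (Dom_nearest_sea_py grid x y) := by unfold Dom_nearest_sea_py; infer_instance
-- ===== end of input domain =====

-- B replaces A's ring-by-ring early-return scan with one pass over all 13x13 offsets picking the
-- minimum (Chebyshev distance, dy, dx) key: an alternative decomposition, not claimed faster.

-- ===== PORT A =====
def inBoundsPy (x y w h : Int) : Bool :=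
  decide (0 ≤ x) && decide (x < w) && decide (0 ≤ y) && decide (y < h)

-- grid[y][x] under try/except: any IndexError (negative wraparound included via pyGet?) gives False
def isSeaPy (grid : List (List Int)) (x y : Int) : Bool :=
  match PySem.List.pyGet? grid y with
  | none => false
  | some row =>
    match PySem.List.pyGet? row x with
    | none => false
    | some v => v == 0

def nearest_sea_py (grid : List (List Int)) (x y : Int) : Int × Int :=
  let h : Int := grid.length
  let w : Int := if h > 0 then ((grid.headD []).length : Int) else 0
  if inBoundsPy x y w h && isSeaPy grid x y then (x, y)
  else
    match (PySem.List.pyRange 1 7 1).findSome? (fun r =>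
      (PySem.List.pyRange (-r) (r+1) 1).findSome? (fun dy =>
        (PySem.List.pyRange (-r) (r+1) 1).findSome? (fun dx =>
          if inBoundsPy (x + dx) (y + dy) w h && isSeaPy grid (x + dx) (y + dy)
          then some (x + dx, y + dy) else none))) with
    | some p => p
    | none => (x, y)

-- ===== PORT B =====
-- Python tuple comparison key < best[0] on (Int, Int, Int), lexicographic strict less-than
def keyLt (a b : Int × Int × Int) : Bool :=
  a.1 < b.1 || (a.1 == b.1 && (a.2.1 < b.2.1 || (a.2.1 == b.2.1 && a.2.2 < b.2.2)))

def nearest_sea_py_alt (grid : List (List Int)) (x y : Int) : Int × Int :=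
  let h : Int := grid.length
  let w : Int := if h > 0 then ((grid.headD []).length : Int) else 0
  if inBoundsPy x y w h && isSeaPy grid x y then (x, y)
  else
    let best := (PySem.List.pyRange (-6) 7 1).foldl (fun best dy =>
      (PySem.List.pyRange (-6) 7 1).foldl (fun best dx =>
        if inBoundsPy (x + dx) (y + dy) w h && isSeaPy grid (x + dx) (y + dy) then
          let key : Int × Int × Int := (max |dx| |dy|, dy, dx)
          match best with
          | none => some (key, x + dx, y + dy)
          | some b => if keyLt key b.1 then some (key, x + dx, y + dy) else best
        else best) best) (none : Option ((Int × Int × Int) × Int × Int))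
    match best with
    | some b => (b.2.1, b.2.2)
    | none => (x, y)

-- ===== PRECONDITION & SPEC =====
def Spec_nearest_sea_py (grid : List (List Int)) (x : Int) (y : Int) (out : Int × Int) : Prop := out = nearest_sea_py_alt grid x y
instance (grid : List (List Int)) (x : Int) (y : Int) (out : Int × Int) : Decidable (Spec_nearest_sea_py grid x y out) := by unfold Spec_nearest_sea_py; infer_instance

-- ===== CLAIM (what is proved, stated in full; the proofs are below) =====
def Claim_equal_nearest_sea_py : Prop := ∀ (grid : List (List Int)) (x : Int) (y : Int), Dom_nearest_sea_py grid x y → Spec_nearest_sea_py grid x y (nearest_sea_py grid x y)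

-- ===== LEMMAS AND PROOFS =====

-- the key B minimises, and the strict order it induces on offsets d = (dy, dx)
def keyOf (d : Int × Int) : Int × Int × Int := (max |d.2| |d.1|, d.1, d.2)
def klt (a b : Int × Int) : Bool := keyLt (keyOf a) (keyOf b)

-- the square of offsets of Chebyshev radius r, in A's row-major scan order
def squareOffs (r : Int) : List (Int × Int) :=
  (PySem.List.pyRange (-r) (r+1) 1).flatMap (fun dy =>
    (PySem.List.pyRange (-r) (r+1) 1).map (fun dx => (dy, dx)))

-- the full sequence of offsets A scans after the initial center check
def bigL : List (Int × Int) := (PySem.List.pyRange 1 7 1).flatMap squareOffs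

-- order-preserving keep-first deduplication
def dedupAcc : List (Int × Int) → List (Int × Int) → List (Int × Int)
  | _, [] => []
  | seen, a :: l => if a ∈ seen then dedupAcc seen l else a :: dedupAcc (a :: seen) l

-- bigL deduplicated and with the center removed: strictly sorted by klt (checked below)
def sortedNC : List (Int × Int) := (dedupAcc [] bigL).filter (fun b => !(b == ((0:Int),(0:Int))))

-- B's accumulator update, on offsets
def upd (ob : Option (Int × Int)) (d : Int × Int) : Option (Int × Int) :=
  match ob with
  | none => some d
  | some b => if klt d b then some d else ob

lemma klt_irrefl (a : Int × Int) : klt a a = false := by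
  simp [klt, keyOf, keyLt]

lemma klt_asymm {a b : Int × Int} (h : klt a b = true) : klt b a = false := by
  obtain ⟨a1, a2⟩ := a; obtain ⟨b1, b2⟩ := b
  simp only [klt, keyOf, keyLt] at *
  simp only [Bool.or_eq_true, Bool.and_eq_true, decide_eq_true_eq, beq_iff_eq,
    Bool.or_eq_false_iff, Bool.and_eq_false_iff, decide_eq_false_iff_not, not_lt,
    beq_eq_false_iff_ne, ne_eq] at *
  omega

lemma klt_trans {a b c : Int × Int} (h1 : klt a b = true) (h2 : klt b c = true) :
    klt a c = true := by
  obtain ⟨a1, a2⟩ := a; obtain ⟨b1, b2⟩ := b; obtain ⟨c1, c2⟩ := c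
  simp only [klt, keyOf, keyLt] at *
  simp only [Bool.or_eq_true, Bool.and_eq_true, decide_eq_true_eq, beq_iff_eq] at *
  omega

lemma klt_conn {a b : Int × Int} (h1 : klt a b = false) (h2 : klt b a = false) : a = b := by
  obtain ⟨a1, a2⟩ := a; obtain ⟨b1, b2⟩ := b
  simp only [klt, keyOf, keyLt] at *
  simp only [Bool.or_eq_false_iff, Bool.and_eq_false_iff, decide_eq_false_iff_not, not_lt,
    beq_eq_false_iff_ne, ne_eq, Prod.mk.injEq] at *
  constructor <;> omega

-- flattening of a nested findSome? over a row-major pair grid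
lemma findSome?_pairGrid {β : Type} (l1 l2 : List Int) (F : Int × Int → Option β) :
    (l1.flatMap (fun dy => l2.map (fun dx => (dy, dx)))).findSome? F
      = l1.findSome? (fun dy => l2.findSome? (fun dx => F (dy, dx))) := by
  induction l1 with
  | nil => rfl
  | cons a t ih =>
    simp only [List.flatMap_cons, List.findSome?_append, List.findSome?_map,
      Function.comp_def, List.findSome?_cons, ih]
    cases l2.findSome? (fun x => F (a, x)) <;> simp [Option.or]

-- flattening of a findSome? over a flatMap
lemma findSome?_flatMap {β : Type} (l : List Int) (s : Int → List (Int × Int))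
    (F : Int × Int → Option β) :
    (l.flatMap s).findSome? F = l.findSome? (fun r => (s r).findSome? F) := by
  induction l with
  | nil => rfl
  | cons a t ih =>
    simp only [List.flatMap_cons, List.findSome?_append, ih, List.findSome?_cons]
    cases (s a).findSome? F <;> simp [Option.or]

-- a guarded findSome? is find? followed by map
lemma findSome?_guard {β : Type} (l : List (Int × Int)) (p : Int × Int → Bool)
    (f : Int × Int → β) :
    l.findSome? (fun a => if p a then some (f a) else none) = (l.find? p).map f := by
  induction l with
  | nil => rfl
  | cons a t ih => by_cases h : p a <;> simp [List.findSome?_cons, List.find?_cons, h, ih]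

-- flattening of a nested foldl over a row-major pair grid
lemma foldl_pairGrid {β : Type} (l1 l2 : List Int) (g : β → Int × Int → β) (b0 : β) :
    (l1.flatMap (fun dy => l2.map (fun dx => (dy, dx)))).foldl g b0
      = l1.foldl (fun b dy => l2.foldl (fun b dx => g b (dy, dx)) b) b0 := by
  induction l1 generalizing b0 with
  | nil => rfl
  | cons a t ih => simp [List.foldl_append, List.foldl_map, ih]

-- B's guarded min-fold is a fold of upd over the filtered list, mapped through the encoding
lemma foldl_filter_upd (P : Int × Int → Bool) (m : Int × Int → Int × Int) :
    ∀ (l : List (Int × Int)) (ob : Option (Int × Int)),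
    l.foldl (fun best d => if P d then
        match best with
        | none => some (keyOf d, (m d).1, (m d).2)
        | some b => if keyLt (keyOf d) b.1 then some (keyOf d, (m d).1, (m d).2) else best
      else best) (ob.map (fun d => (keyOf d, (m d).1, (m d).2)))
      = ((l.filter P).foldl upd ob).map (fun d => (keyOf d, (m d).1, (m d).2)) := by
  intro l
  induction l with
  | nil => intro ob; rfl
  | cons a t ih =>
    intro ob
    by_cases h : P a
    · simp only [List.foldl_cons, List.filter_cons, h, if_pos]
      have step : (match ob.map (fun d => (keyOf d, (m d).1, (m d).2)) with
          | none => some (keyOf a, (m a).1, (m a).2)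
          | some b => if keyLt (keyOf a) b.1 then some (keyOf a, (m a).1, (m a).2)
              else ob.map (fun d => (keyOf d, (m d).1, (m d).2)))
          = (upd ob a).map (fun d => (keyOf d, (m d).1, (m d).2)) := by
        cases ob with
        | none => simp [upd]
        | some b => by_cases hk : keyLt (keyOf a) (keyOf b) <;> simp [upd, klt, hk]
      rw [step, ih]
    · have hf : P a = false := by simpa using h
      simp [List.filter_cons, hf, ih ob]

-- removing elements on which p is false does not change find?
lemma find?_filter_ne (p : Int × Int → Bool) (a0 : Int × Int) (h : p a0 = false) :
    ∀ l : List (Int × Int), (l.filter (fun b => !(b == a0))).find? p = l.find? p := by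
  intro l
  induction l with
  | nil => rfl
  | cons a t ih =>
    by_cases he : a = a0
    · subst he; simp [List.filter_cons, List.find?_cons, h, ih]
    · simp only [List.filter_cons, beq_iff_eq, he, not_false_iff, Bool.not_eq_true']
      simp only [beq_eq_false_iff_ne, ne_eq, he, not_false_eq_true, if_pos]
      by_cases hp : p a <;> simp [List.find?_cons, hp, ih]

-- keep-first dedup does not change find? (as long as p is false on everything dropped so far)
lemma find?_dedupAcc (p : Int × Int → Bool) :
    ∀ (l seen : List (Int × Int)), (∀ a ∈ seen, p a = false) →
    (dedupAcc seen l).find? p = l.find? p := by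
  intro l
  induction l with
  | nil => intro seen _; rfl
  | cons a t ih =>
    intro seen hseen
    by_cases hm : a ∈ seen
    · have hpa : p a = false := hseen a hm
      simp [dedupAcc, hm, List.find?_cons, hpa, ih seen hseen]
    · by_cases hp : p a
      · simp [dedupAcc, hm, List.find?_cons, hp]
      · have hseen' : ∀ b ∈ a :: seen, p b = false := by
          intro b hb
          rcases List.mem_cons.mp hb with h1 | h2
          · subst h1; simpa using hp
          · exact hseen b h2
        simp [dedupAcc, hm, List.find?_cons, hp, ih (a :: seen) hseen']

-- a fold of upd started from some value always returns some value
lemma pick_isSome : ∀ (m : List (Int × Int)) (c : Int × Int),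
    ∃ r, m.foldl upd (some c) = some r := by
  intro m
  induction m with
  | nil => intro c; exact ⟨c, rfl⟩
  | cons d t ih =>
    intro c
    by_cases h : klt d c
    · simpa [upd, h] using ih d
    · simpa [upd, h] using ih c

-- what a fold of upd returns: an element no later element beats
lemma pick_spec : ∀ (m : List (Int × Int)) (ob : Option (Int × Int)) (r : Int × Int),
    m.foldl upd ob = some r →
    (r ∈ m ∨ ob = some r) ∧ (∀ b ∈ m, klt b r = false) ∧
      (∀ c, ob = some c → r = c ∨ klt r c = true) := by
  intro m
  induction m with
  | nil =>
    intro ob r h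
    simp only [List.foldl_nil] at h
    refine ⟨Or.inr h, by simp, ?_⟩
    intro c hc
    rw [h] at hc
    exact Or.inl (Option.some.inj hc)
  | cons d t ih =>
    intro ob r h
    simp only [List.foldl_cons] at h
    obtain ⟨hmem, hmin, hacc⟩ := ih (upd ob d) r h
    cases ob with
    | none =>
      have hacc' := hacc d rfl
      have hdr : klt d r = false := by
        rcases hacc' with h1 | h2
        · rw [h1]; exact klt_irrefl d
        · exact klt_asymm h2
      refine ⟨?_, ?_, ?_⟩
      · rcases hmem with h1 | h2
        · exact Or.inl (List.mem_cons_of_mem d h1)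
        · have h3 : d = r := Option.some.inj h2
          exact Or.inl (by simp [h3])
      · intro b hb
        rcases List.mem_cons.mp hb with h1 | h2
        · rw [h1]; exact hdr
        · exact hmin b h2
      · intro c hc; simp at hc
    | some b0 =>
      by_cases hk : klt d b0
      · have hupd : upd (some b0) d = some d := by simp [upd, hk]
        rw [hupd] at hmem hacc
        have hacc' := hacc d rfl
        have hdr : klt d r = false := by
          rcases hacc' with h1 | h2
          · rw [h1]; exact klt_irrefl d
          · exact klt_asymm h2
        refine ⟨?_, ?_, ?_⟩
        · rcases hmem with h1 | h2
          · exact Or.inl (List.mem_cons_of_mem d h1)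
          · have h3 : d = r := Option.some.inj h2
            exact Or.inl (by simp [h3])
        · intro b hb
          rcases List.mem_cons.mp hb with h1 | h2
          · rw [h1]; exact hdr
          · exact hmin b h2
        · intro c hc
          have hcb : b0 = c := Option.some.inj hc
          rcases hacc' with h1 | h2
          · right; rw [h1, ← hcb]; exact hk
          · right; rw [← hcb]; exact klt_trans h2 hk
      · have hupd : upd (some b0) d = some b0 := by simp [upd, hk]
        rw [hupd] at hmem hacc
        have hkf : klt d b0 = false := by simpa using hk
        have hdr : klt d r = false := by
          rcases hacc b0 rfl with h1 | h2
          · rw [h1]; exact hkf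
          · cases hdr0 : klt d r
            · rfl
            · exact absurd (klt_trans hdr0 h2) (by simp [hkf])
        refine ⟨?_, ?_, ?_⟩
        · rcases hmem with h1 | h2
          · exact Or.inl (List.mem_cons_of_mem d h1)
          · exact Or.inr h2
        · intro b hb
          rcases List.mem_cons.mp hb with h1 | h2
          · rw [h1]; exact hdr
          · exact hmin b h2
        · intro c hc
          have hcb : b0 = c := Option.some.inj hc
          rw [← hcb]
          exact hacc b0 rfl

-- the unique minimal element is what the fold returns
lemma pick_unique (m : List (Int × Int)) (a : Int × Int) (ha : a ∈ m)
    (hmin : ∀ b ∈ m, klt b a = false) : m.foldl upd none = some a := by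
  cases m with
  | nil => simp at ha
  | cons d t =>
    have h0 : (d :: t).foldl upd none = t.foldl upd (some d) := by simp [upd]
    obtain ⟨r, hr⟩ := pick_isSome t d
    rw [h0, hr]
    obtain ⟨hmem, hminr, hacc⟩ := pick_spec t (some d) r (hr)
    have hrm : r ∈ d :: t := by
      rcases hmem with h1 | h2
      · exact List.mem_cons_of_mem d h1
      · have h3 : d = r := Option.some.inj h2
        simp [h3]
    have hra : klt r a = false := hmin r hrm
    have har : klt a r = false := by
      rcases List.mem_cons.mp ha with h1 | h2
      · rcases hacc d rfl with h3 | h4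
        · rw [h1, h3]; exact klt_irrefl d
        · rw [h1]; exact klt_asymm h4
      · exact hminr a h2
    rw [klt_conn har hra]

-- find? on a strictly sorted list returns the minimum among matches
lemma sorted_find?_min (s : List (Int × Int)) (P : Int × Int → Bool)
    (hs : s.Pairwise (fun a b => klt a b = true)) (a : Int × Int)
    (h : s.find? P = some a) : ∀ b ∈ s, P b = true → klt b a = false := by
  induction s with
  | nil => simp at h
  | cons c t ih =>
    intro b hb hPb
    by_cases hc : P c
    · have hac : c = a := by simpa [List.find?_cons, hc] using h
      rcases List.mem_cons.mp hb with h1 | h2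
      · rw [h1, ← hac]; exact klt_irrefl c
      · rw [← hac]; exact klt_asymm ((List.pairwise_cons.mp hs).1 b h2)
    · have h' : t.find? P = some a := by simpa [List.find?_cons, hc] using h
      rcases List.mem_cons.mp hb with h1 | h2
      · subst h1; rw [hPb] at hc; simp at hc
      · exact ih (List.pairwise_cons.mp hs).2 h' b h2 hPb

set_option maxHeartbeats 4000000 in
set_option maxRecDepth 100000 in
lemma sortedNC_pairwise : sortedNC.Pairwise (fun a b => klt a b = true) := by decide

set_option maxHeartbeats 4000000 in
set_option maxRecDepth 100000 in
lemma square6_cases : ∀ d ∈ squareOffs 6, d = ((0:Int), (0:Int)) ∨ d ∈ sortedNC := by decide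

set_option maxHeartbeats 4000000 in
set_option maxRecDepth 100000 in
lemma sortedNC_sub : ∀ d ∈ sortedNC, d ∈ squareOffs 6 := by decide

-- A is the first hit of a guarded scan of bigL
lemma A_char (grid : List (List Int)) (x y : Int) :
    nearest_sea_py grid x y =
      (if inBoundsPy x y (if (grid.length : Int) > 0 then ((grid.headD []).length : Int) else 0) (grid.length : Int) && isSeaPy grid x y then (x, y)
       else
         match (bigL.find? (fun d =>
             inBoundsPy (x + d.2) (y + d.1) (if (grid.length : Int) > 0 then ((grid.headD []).length : Int) else 0) (grid.length : Int) && isSeaPy grid (x + d.2) (y + d.1))).map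
             (fun d => (x + d.2, y + d.1)) with
         | some p => p
         | none => (x, y)) := by
  unfold nearest_sea_py
  dsimp only
  conv_rhs => rw [← findSome?_guard]
  simp only [bigL]
  rw [findSome?_flatMap]
  simp only [squareOffs]
  simp only [findSome?_pairGrid]

-- B is the minimum of upd over the filtered square, through the encoding
lemma B_char (grid : List (List Int)) (x y : Int) :
    nearest_sea_py_alt grid x y =
      (if inBoundsPy x y (if (grid.length : Int) > 0 then ((grid.headD []).length : Int) else 0) (grid.length : Int) && isSeaPy grid x y then (x, y)
       else
         match (((squareOffs 6).filter (fun d =>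
             inBoundsPy (x + d.2) (y + d.1) (if (grid.length : Int) > 0 then ((grid.headD []).length : Int) else 0) (grid.length : Int) && isSeaPy grid (x + d.2) (y + d.1))).foldl upd none).map
             (fun d => (keyOf d, ((fun d => (x + d.2, y + d.1)) d).1, ((fun d => (x + d.2, y + d.1)) d).2)) with
         | some b => (b.2.1, b.2.2)
         | none => (x, y)) := by
  unfold nearest_sea_py_alt
  dsimp only
  conv_rhs => rw [← foldl_filter_upd _ (fun d => (x + d.2, y + d.1)) (squareOffs 6) none]
  simp only [squareOffs]
  rw [foldl_pairGrid]
  rfl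

lemma main_eq (grid : List (List Int)) (x y : Int) :
    nearest_sea_py grid x y = nearest_sea_py_alt grid x y := by
  rw [A_char, B_char]
  set h : Int := (grid.length : Int) with hh
  set w : Int := if h > 0 then ((grid.headD []).length : Int) else 0 with hw
  set P : Int × Int → Bool :=
    fun d => inBoundsPy (x + d.2) (y + d.1) w h && isSeaPy grid (x + d.2) (y + d.1) with hP
  by_cases hg : inBoundsPy x y w h && isSeaPy grid x y
  · simp [hg]
  · have hgf : (inBoundsPy x y w h && isSeaPy grid x y) = false := by simpa using hg
    simp only [hgf, Bool.false_eq_true, if_false]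
    have h00 : P ((0:Int), (0:Int)) = false := by
      rw [hP]; simpa using hgf
    have hA : bigL.find? P = sortedNC.find? P := by
      rw [← find?_dedupAcc P bigL [] (by simp)]
      rw [show sortedNC = (dedupAcc [] bigL).filter (fun b => !(b == ((0:Int),(0:Int)))) from rfl,
        find?_filter_ne P _ h00]
    cases hfind : sortedNC.find? P with
    | none =>
      have hnone : ∀ a ∈ sortedNC, ¬ P a := List.find?_eq_none.mp hfind
      have hfilt : (squareOffs 6).filter P = [] := by
        rw [List.filter_eq_nil_iff]
        intro d hd
        rcases square6_cases d hd with h1 | h2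
        · rw [h1]; simp [h00]
        · exact hnone d h2
      rw [hA, hfind, hfilt]
      rfl
    | some a =>
      have hPa : P a = true := List.find?_some hfind
      have hmem : a ∈ sortedNC := List.mem_of_find?_eq_some hfind
      have hminS : ∀ b ∈ sortedNC, P b = true → klt b a = false :=
        sorted_find?_min sortedNC P sortedNC_pairwise a hfind
      have hafil : a ∈ (squareOffs 6).filter P :=
        List.mem_filter.mpr ⟨sortedNC_sub a hmem, hPa⟩
      have hminF : ∀ b ∈ (squareOffs 6).filter P, klt b a = false := by
        intro b hb
        obtain ⟨hb6, hPb⟩ := List.mem_filter.mp hb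
        rcases square6_cases b hb6 with h1 | h2
        · rw [h1, h00] at hPb; cases hPb
        · exact hminS b h2 hPb
      have hpick := pick_unique ((squareOffs 6).filter P) a hafil hminF
      rw [hA, hfind, hpick]
      rfl

-- ===== VERDICT (by name: the statement is the Claim_ definition above) =====
theorem nearest_sea_py_spec : Claim_equal_nearest_sea_py := by
  intro grid x y _
  unfold Spec_nearest_sea_py
  exact main_eq grid x y
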